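-- pv_equiv track=rewrite | github.com/standardgalactic/rama | blandify.py | anodize_headline
-- ===== SOURCE A (Python) =====
-- def anodize_headline(headline):
--     # Simplistic keyword replacement approach
--     replacements = {
--         'Shocking': 'Surprising',
--         'Incredible': 'Noteworthy',
--         'Unbelievable': 'Interesting',
--         # Add more replacements as needed
--     }
--     for sensational, mundane in replacements.items():
--         headline = headline.replace(sensational, mundane)
--     return headline
-- ===== SOURCE B (Python) =====
-- def anodize_headline(headline):
--     # Single left-to-right scan: at each position try the replacement table,
--     # emit the mundane word on a match (skipping the key), else copy the char.
--     replacements = {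
--         'Shocking': 'Surprising',
--         'Incredible': 'Noteworthy',
--         'Unbelievable': 'Interesting',
--     }
--     out = []
--     i = 0
--     n = len(headline)
--     while i < n:
--         for key, val in replacements.items():
--             if headline.startswith(key, i):
--                 out.append(val)
--                 i += len(key)
--                 break
--         else:
--             out.append(headline[i])
--             i += 1
--     return ''.join(out)
-- ===== Notes on version B (the rewrite author's own statement) =====
-- stated objective: alternative
-- what changed: Replaced three full str.replace passes with one left-to-right scan that consults the replacement table at each position and emits the result in a single pass.
import Mathlib
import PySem

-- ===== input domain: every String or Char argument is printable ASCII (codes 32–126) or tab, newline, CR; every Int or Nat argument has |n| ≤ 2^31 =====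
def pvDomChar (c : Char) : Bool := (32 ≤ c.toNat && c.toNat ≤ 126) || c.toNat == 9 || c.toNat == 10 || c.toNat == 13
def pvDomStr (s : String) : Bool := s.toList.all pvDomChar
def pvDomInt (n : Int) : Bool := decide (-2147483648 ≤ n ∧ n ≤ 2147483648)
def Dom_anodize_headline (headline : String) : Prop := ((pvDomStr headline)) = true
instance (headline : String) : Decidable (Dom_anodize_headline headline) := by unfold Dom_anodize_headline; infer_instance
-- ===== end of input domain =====

-- B replaces A's three sequential str.replace passes by ONE left-to-right scan with a
-- match table (objective: alternative single-pass algorithm, same return value).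

-- ===== PORT A =====
-- Three sequential full-string replace passes, in the dict's insertion order.
def anodize_headline (headline : String) : String :=
  PySem.Str.replace
    (PySem.Str.replace
      (PySem.Str.replace headline "Shocking" "Surprising")
      "Incredible" "Noteworthy")
    "Unbelievable" "Interesting"

-- ===== PORT B =====
-- One left-to-right scan: at each position try the keys in table order; on a match emit
-- the replacement and skip the key, else copy one character.
def pvScanB : List Char → List Char
  | [] => []
  | c :: t =>
    if "Shocking".toList.isPrefixOf (c :: t) then
      "Surprising".toList ++ pvScanB (t.drop 7)
    else if "Incredible".toList.isPrefixOf (c :: t) then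
      "Noteworthy".toList ++ pvScanB (t.drop 9)
    else if "Unbelievable".toList.isPrefixOf (c :: t) then
      "Interesting".toList ++ pvScanB (t.drop 11)
    else
      c :: pvScanB t
termination_by l => l.length
decreasing_by all_goals (simp; try omega)

def anodize_headline_alt (headline : String) : String :=
  String.ofList (pvScanB headline.toList)

-- ===== PRECONDITION & SPEC =====
def Spec_anodize_headline (headline : String) (out : String) : Prop := out = anodize_headline_alt headline
instance (headline : String) (out : String) : Decidable (Spec_anodize_headline headline out) := by unfold Spec_anodize_headline; infer_instance

-- ===== CLAIM (what is proved, stated in full; the proofs are below) =====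
def Claim_equal_anodize_headline : Prop := ∀ (headline : String), Dom_anodize_headline headline → Spec_anodize_headline headline (anodize_headline headline)

-- ===== LEMMAS AND PROOFS =====

-- A clean recursion equal to PySem.Chars.replace for a nonempty pattern.
def pvRepl (old new : List Char) : List Char → List Char
  | [] => []
  | c :: t =>
    if old.isPrefixOf (c :: t) then new ++ pvRepl old new (t.drop (old.length - 1))
    else c :: pvRepl old new t
termination_by l => l.length
decreasing_by all_goals (simp; try omega)

theorem pvRepl_nil (old new : List Char) : pvRepl old new [] = [] := by
  simp [pvRepl]

theorem pvRepl_cons_pos (old new : List Char) (c : Char) (t : List Char)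
    (h : old.isPrefixOf (c :: t) = true) :
    pvRepl old new (c :: t) = new ++ pvRepl old new (t.drop (old.length - 1)) := by
  rw [pvRepl, if_pos h]

theorem pvRepl_cons_neg (old new : List Char) (c : Char) (t : List Char)
    (h : ¬ old.isPrefixOf (c :: t) = true) :
    pvRepl old new (c :: t) = c :: pvRepl old new t := by
  rw [pvRepl, if_neg h]

theorem pvReplace_go_eq (old new : List Char) (hold : old ≠ []) :
    ∀ (fuel : Nat) (l acc : List Char), l.length ≤ fuel →
      PySem.Chars.replace.go old new fuel l acc = acc.reverse ++ pvRepl old new l := by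
  intro fuel
  induction fuel with
  | zero =>
    intro l acc hl
    have : l = [] := List.eq_nil_of_length_eq_zero (Nat.le_zero.mp hl)
    subst this
    simp [PySem.Chars.replace.go, pvRepl_nil]
  | succ n ih =>
    intro l acc hl
    cases l with
    | nil => simp [PySem.Chars.replace.go, pvRepl_nil]
    | cons c t =>
      by_cases h : old.isPrefixOf (c :: t) = true
      · rw [PySem.Chars.replace.go, if_pos h, pvRepl_cons_pos old new c t h]
        have hlen : old.length ≥ 1 := by
          cases old with
          | nil => exact absurd rfl hold
          | cons _ _ => simp
        have hdrop : (c :: t).drop old.length = t.drop (old.length - 1) := by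
          obtain ⟨k, hk⟩ : ∃ k, old.length = k + 1 := ⟨old.length - 1, by omega⟩
          rw [hk]; simp
        rw [hdrop, ih _ _ (by simp at hl ⊢; omega)]
        simp
      · rw [PySem.Chars.replace.go, if_neg h, pvRepl_cons_neg old new c t h,
          ih _ _ (by simp at hl ⊢; omega)]
        simp

theorem pvReplace_eq (s old new : List Char) (hold : old ≠ []) :
    PySem.Chars.replace s old new = pvRepl old new s := by
  rw [PySem.Chars.replace, if_neg (by simpa using hold)]
  simpa using pvReplace_go_eq old new hold s.length s [] le_rfl

-- Skipping a block whose characters never start the pattern.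
theorem pvRepl_append_of_head_notMem (oh : Char) (ot new : List Char) :
    ∀ (a b : List Char), oh ∉ a →
      pvRepl (oh :: ot) new (a ++ b) = a ++ pvRepl (oh :: ot) new b := by
  intro a
  induction a with
  | nil => intro b _; simp
  | cons c a' ih =>
    intro b hmem
    have hc : c ≠ oh := fun h => hmem (by simp [h])
    have hpre : ¬ (oh :: ot).isPrefixOf (c :: (a' ++ b)) = true := by
      simp [List.isPrefixOf]
      intro h; exact absurd h.symm hc
    rw [List.cons_append, pvRepl_cons_neg _ _ _ _ hpre, ih b (fun h => hmem (by simp [h]))]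
    simp

-- Consuming the pattern at the front.
theorem pvRepl_append_self (oh : Char) (ot new b : List Char) :
    pvRepl (oh :: ot) new ((oh :: ot) ++ b) = new ++ pvRepl (oh :: ot) new b := by
  rw [List.cons_append, pvRepl_cons_pos _ _ _ _ (by simp [List.isPrefixOf_iff_prefix])]
  simp

-- A prefix avoiding the replacement's head survives backwards through pvRepl.
theorem pvRepl_prefix_back (oh : Char) (ot : List Char) (nh : Char) (nt : List Char) :
    ∀ (n : Nat) (t : List Char), t.length ≤ n → ∀ (q : List Char), nh ∉ q →
      q <+: pvRepl (oh :: ot) (nh :: nt) t → q <+: t := by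
  intro n
  induction n with
  | zero =>
    intro t ht q _ hq
    have : t = [] := List.eq_nil_of_length_eq_zero (Nat.le_zero.mp ht)
    subst this
    rwa [pvRepl_nil] at hq
  | succ m ih =>
    intro t ht q hmem hq
    cases t with
    | nil => rwa [pvRepl_nil] at hq
    | cons c t' =>
      by_cases h : (oh :: ot).isPrefixOf (c :: t') = true
      · rw [pvRepl_cons_pos _ _ _ _ h] at hq
        cases q with
        | nil => exact List.nil_prefix
        | cons qh q' =>
          exfalso
          have : qh = nh := by
            obtain ⟨r, hr⟩ := hq
            simpa using (congrArg (fun l => l.head?) hr.symm).symm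
          exact hmem (by simp [this])
      · rw [pvRepl_cons_neg _ _ _ _ h] at hq
        cases q with
        | nil => exact List.nil_prefix
        | cons qh q' =>
          obtain ⟨r, hr⟩ := hq
          simp at hr
          obtain ⟨hqc, hr'⟩ := hr
          have : q' <+: pvRepl (oh :: ot) (nh :: nt) t' := ⟨r, hr'⟩
          have hq' : q' <+: t' :=
            ih t' (by simp at ht; omega) q' (fun h' => hmem (by simp [h'])) this
          obtain ⟨r', hr''⟩ := hq'
          exact ⟨r', by simp [hqc, hr'']⟩

-- The three-pass chain on lists.
def pvChainA (l : List Char) : List Char :=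
  pvRepl "Unbelievable".toList "Interesting".toList
    (pvRepl "Incredible".toList "Noteworthy".toList
      (pvRepl "Shocking".toList "Surprising".toList l))

theorem pvChain_eq_scan : ∀ (n : Nat) (l : List Char), l.length ≤ n → pvChainA l = pvScanB l := by
  intro n
  induction n with
  | zero =>
    intro l hl
    have : l = [] := List.eq_nil_of_length_eq_zero (Nat.le_zero.mp hl)
    subst this
    simp [pvChainA, pvRepl_nil, pvScanB]
  | succ m ih =>
    intro l hl
    cases l with
    | nil => simp [pvChainA, pvRepl_nil, pvScanB]
    | cons c t =>
      by_cases h1 : "Shocking".toList.isPrefixOf (c :: t) = true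
      · -- l = "Shocking" ++ t₁
        obtain ⟨t₁, ht⟩ := List.isPrefixOf_iff_prefix.mp h1
        have ht7 : t.drop 7 = t₁ := by
          have := congrArg (fun l => l.drop 8) ht
          simpa using this.symm
        have hlen : t₁.length ≤ m := by
          have := congrArg List.length ht
          simp at this hl; omega
        have hA : pvChainA (c :: t) = "Surprising".toList ++ pvChainA t₁ := by
          unfold pvChainA
          rw [← ht, show ("Shocking".toList : List Char) = 'S' :: "hocking".toList from rfl,
            pvRepl_append_self,
            show ('S' :: "hocking".toList : List Char) = "Shocking".toList from rfl]
          rw [show ("Incredible".toList : List Char) = 'I' :: "ncredible".toList from rfl,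
            pvRepl_append_of_head_notMem _ _ _ _ _ (by decide),
            show ('I' :: "ncredible".toList : List Char) = "Incredible".toList from rfl]
          rw [show ("Unbelievable".toList : List Char) = 'U' :: "nbelievable".toList from rfl,
            pvRepl_append_of_head_notMem _ _ _ _ _ (by decide)]
        rw [hA, pvScanB, if_pos h1, ht7, ih t₁ hlen]
      · by_cases h2 : "Incredible".toList.isPrefixOf (c :: t) = true
        · obtain ⟨t₁, ht⟩ := List.isPrefixOf_iff_prefix.mp h2
          have ht9 : t.drop 9 = t₁ := by
            have := congrArg (fun l => l.drop 10) ht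
            simpa using this.symm
          have hlen : t₁.length ≤ m := by
            have := congrArg List.length ht
            simp at this hl; omega
          have hA : pvChainA (c :: t) = "Noteworthy".toList ++ pvChainA t₁ := by
            unfold pvChainA
            rw [← ht, show ("Shocking".toList : List Char) = 'S' :: "hocking".toList from rfl,
              pvRepl_append_of_head_notMem _ _ _ _ _ (by decide),
              show ('S' :: "hocking".toList : List Char) = "Shocking".toList from rfl]
            rw [show ("Incredible".toList : List Char) = 'I' :: "ncredible".toList from rfl,
              pvRepl_append_self,
              show ('I' :: "ncredible".toList : List Char) = "Incredible".toList from rfl]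
            rw [show ("Unbelievable".toList : List Char) = 'U' :: "nbelievable".toList from rfl,
              pvRepl_append_of_head_notMem _ _ _ _ _ (by decide)]
          rw [hA, pvScanB, if_neg h1, if_pos h2, ht9, ih t₁ hlen]
        · by_cases h3 : "Unbelievable".toList.isPrefixOf (c :: t) = true
          · obtain ⟨t₁, ht⟩ := List.isPrefixOf_iff_prefix.mp h3
            have ht11 : t.drop 11 = t₁ := by
              have := congrArg (fun l => l.drop 12) ht
              simpa using this.symm
            have hlen : t₁.length ≤ m := by
              have := congrArg List.length ht
              simp at this hl; omega
            have hA : pvChainA (c :: t) = "Interesting".toList ++ pvChainA t₁ := by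
              unfold pvChainA
              rw [← ht, show ("Shocking".toList : List Char) = 'S' :: "hocking".toList from rfl,
                pvRepl_append_of_head_notMem _ _ _ _ _ (by decide),
                show ('S' :: "hocking".toList : List Char) = "Shocking".toList from rfl]
              rw [show ("Incredible".toList : List Char) = 'I' :: "ncredible".toList from rfl,
                pvRepl_append_of_head_notMem _ _ _ _ _ (by decide),
                show ('I' :: "ncredible".toList : List Char) = "Incredible".toList from rfl]
              rw [show ("Unbelievable".toList : List Char) = 'U' :: "nbelievable".toList from rfl,
                pvRepl_append_self]
            rw [hA, pvScanB, if_neg h1, if_neg h2, if_pos h3, ht11, ih t₁ hlen]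
          · -- no key matches at this position
            have hlen : t.length ≤ m := by simp at hl; omega
            have hA : pvChainA (c :: t) = c :: pvChainA t := by
              unfold pvChainA
              rw [pvRepl_cons_neg _ _ _ _ h1]
              have hK2 : ¬ ("Incredible".toList).isPrefixOf
                  (c :: pvRepl "Shocking".toList "Surprising".toList t) = true := by
                intro hp
                apply h2
                rw [List.isPrefixOf_iff_prefix] at hp ⊢
                obtain ⟨r, hr⟩ := hp
                simp [show ("Incredible".toList : List Char) = 'I' :: "ncredible".toList from rfl] at hr ⊢
                obtain ⟨hc, hr'⟩ := hr
                refine ⟨hc, ?_⟩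
                have hq : "ncredible".toList <+: pvRepl "Shocking".toList "Surprising".toList t :=
                  ⟨r, hr'⟩
                exact pvRepl_prefix_back 'S' "hocking".toList 'S' "urprising".toList
                  t.length t le_rfl _ (by decide) hq
              rw [pvRepl_cons_neg _ _ _ _ hK2]
              have hK3 : ¬ ("Unbelievable".toList).isPrefixOf
                  (c :: pvRepl "Incredible".toList "Noteworthy".toList
                    (pvRepl "Shocking".toList "Surprising".toList t)) = true := by
                intro hp
                apply h3
                rw [List.isPrefixOf_iff_prefix] at hp ⊢
                obtain ⟨r, hr⟩ := hp
                simp [show ("Unbelievable".toList : List Char) = 'U' :: "nbelievable".toList from rfl] at hr ⊢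
                obtain ⟨hc, hr'⟩ := hr
                refine ⟨hc, ?_⟩
                have hq1 : "nbelievable".toList <+:
                    pvRepl "Incredible".toList "Noteworthy".toList
                      (pvRepl "Shocking".toList "Surprising".toList t) := ⟨r, hr'⟩
                have hq2 : "nbelievable".toList <+:
                    pvRepl "Shocking".toList "Surprising".toList t :=
                  pvRepl_prefix_back 'I' "ncredible".toList 'N' "oteworthy".toList
                    _ _ le_rfl _ (by decide) hq1
                exact pvRepl_prefix_back 'S' "hocking".toList 'S' "urprising".toList
                  t.length t le_rfl _ (by decide) hq2
              rw [pvRepl_cons_neg _ _ _ _ hK3]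
            rw [hA, pvScanB, if_neg h1, if_neg h2, if_neg h3, ih t hlen]

-- ===== VERDICT (by name: the statement is the Claim_ definition above) =====
theorem anodize_headline_spec : Claim_equal_anodize_headline := by
  intro headline _
  unfold Spec_anodize_headline anodize_headline anodize_headline_alt
  apply String.toList_inj.mp
  simp only [PySem.Str.toList_replace]
  rw [pvReplace_eq _ _ _ (by decide), pvReplace_eq _ _ _ (by decide),
    pvReplace_eq _ _ _ (by decide)]
  have := pvChain_eq_scan headline.toList.length headline.toList le_rfl
  unfold pvChainA at this
  rw [this, String.toList_ofList]
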